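-- pv_equiv track=rewrite | github.com/89935/OpenRE | entity_verb/contextOfWord_v2.py | contextOfEntity
-- ===== SOURCE A (Python) =====
-- def contextOfEntity(text_clean, entity, window_size):
--     result_list = []
--     index = 0
--     while index<len(text_clean):
--         index = text_clean.find(entity,index)
--         if index==-1:
--             break
--         else:
--             result_list.append(text_clean[index-window_size:index+window_size+len(entity)])
--             index += len(entity)
--     return result_list
-- ===== SOURCE B (Python) =====
-- def contextOfEntity(text_clean, entity, window_size):
--     parts = text_clean.split(entity)
--     result_list = []
--     pos = 0
--     for piece in parts[:-1]:
--         pos += len(piece)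
--         result_list.append(text_clean[pos - window_size:pos + window_size + len(entity)])
--         pos += len(entity)
--     return result_list
-- ===== Notes on version B (the rewrite author's own statement) =====
-- stated objective: alternative
-- what changed: Instead of scanning with str.find and index bookkeeping, B splits the text on the entity once and recovers each occurrence position as a running prefix-sum of piece and entity lengths, slicing the same window at each recovered position.
-- outside the precondition, e.g. on contextOfEntity('', '', 0): A returns [], B raises ValueError; on contextOfEntity('ab', '', 0): A does not finish within the time limit, B raises ValueError
import Mathlib
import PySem

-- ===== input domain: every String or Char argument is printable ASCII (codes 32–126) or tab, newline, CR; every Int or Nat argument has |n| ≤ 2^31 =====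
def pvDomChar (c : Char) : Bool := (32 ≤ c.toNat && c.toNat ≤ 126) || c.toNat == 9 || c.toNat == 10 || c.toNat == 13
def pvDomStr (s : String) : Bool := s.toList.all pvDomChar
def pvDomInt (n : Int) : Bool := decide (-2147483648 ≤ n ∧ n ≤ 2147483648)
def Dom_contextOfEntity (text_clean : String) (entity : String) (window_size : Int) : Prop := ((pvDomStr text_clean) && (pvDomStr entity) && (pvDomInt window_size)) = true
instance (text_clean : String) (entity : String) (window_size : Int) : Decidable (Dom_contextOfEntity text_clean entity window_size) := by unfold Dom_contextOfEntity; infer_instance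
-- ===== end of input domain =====

-- B replaces A's str.find scan with index bookkeeping by splitting the text on the entity once
-- and recovering each occurrence position as a running prefix-sum of piece lengths (alternative).

-- ===== PORT A =====
-- the while loop of A: index advances past each found occurrence; fuel = len(text)+1 suffices
-- for non-empty entity (each iteration advances index by ≥ 1); A diverges on entity = "" (outside Pre_).
def pvGoA (t e : List Char) (w : Int) : Nat → Nat → List String
  | 0, _ => []
  | fuel+1, index =>
    if index < t.length then
      let j := PySem.Chars.findFrom t e (index : Int) none
      if j = -1 then []
      else
        String.ofList (PySem.Chars.slice t (some (j - w)) (some (j + w + (e.length : Int)))) ::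
          pvGoA t e w fuel (j.toNat + e.length)
    else []

def contextOfEntity (text_clean : String) (entity : String) (window_size : Int) : List String :=
  pvGoA text_clean.toList entity.toList window_size (text_clean.toList.length + 1) 0

-- ===== PORT B =====
-- Source B: parts = text_clean.split(entity); then a fold over parts[:-1] keeping (pos, result_list);
-- split("") raises ValueError in Python → Str.split? is none there (excluded by Pre_, port returns []).
def contextOfEntity_alt (text_clean : String) (entity : String) (window_size : Int) : List String :=
  match PySem.Str.split? text_clean entity with
  | none => []
  | some parts =>
    (parts.dropLast.foldl
      (fun (st : Nat × List String) (piece : String) =>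
        let pos := st.1 + piece.toList.length
        (pos + entity.toList.length,
         st.2 ++ [String.ofList (PySem.Chars.slice text_clean.toList
            (some ((pos : Int) - window_size))
            (some ((pos : Int) + window_size + (entity.toList.length : Int))))]))
      (0, [])).2

-- ===== PRECONDITION & SPEC =====
-- Pre_ excludes the empty entity: there A diverges on any non-empty text (and returns [] on empty
-- text), while B's str.split raises ValueError.
def Pre_contextOfEntity (text_clean : String) (entity : String) (window_size : Int) : Prop :=
  entity ≠ ""
instance (text_clean : String) (entity : String) (window_size : Int) : Decidable (Pre_contextOfEntity text_clean entity window_size) := by unfold Pre_contextOfEntity; infer_instance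

def pvWitness_contextOfEntity : String × String × Int := ("aba", "a", 1)

def Spec_contextOfEntity (text_clean : String) (entity : String) (window_size : Int) (out : List String) : Prop := out = contextOfEntity_alt text_clean entity window_size
instance (text_clean : String) (entity : String) (window_size : Int) (out : List String) : Decidable (Spec_contextOfEntity text_clean entity window_size out) := by unfold Spec_contextOfEntity; infer_instance

-- ===== CLAIM (what is proved, stated in full; the proofs are below) =====
def Claim_equal_contextOfEntity : Prop := ∀ (text_clean : String) (entity : String) (window_size : Int), Dom_contextOfEntity text_clean entity window_size → Pre_contextOfEntity text_clean entity window_size → Spec_contextOfEntity text_clean entity window_size (contextOfEntity text_clean entity window_size)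

-- ===== LEMMAS AND PROOFS =====

-- the non-overlapping occurrence positions of e in t from index i (proof-side characterisation)
def pvOcc (t e : List Char) (i : Nat) : List Nat :=
  if h : i < t.length then
    if e.isPrefixOf (t.drop i) then i :: pvOcc t e (i + (max e.length 1))
    else pvOcc t e (i + 1)
  else []
termination_by t.length - i
decreasing_by all_goals omega

def pvSliceF (t e : List Char) (w : Int) (m : Nat) : String :=
  String.ofList (PySem.Chars.slice t (some ((m : Int) - w)) (some ((m : Int) + w + (e.length : Int))))

-- ---- A-side: pvGoA equals the map over pvOcc ----

lemma pvOcc_nil (t e : List Char) (i : Nat) (h : ¬ e <:+: t.drop i) : pvOcc t e i = [] := by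
  induction i using pvOcc.induct t e with
  | case1 x hx hp ih =>
    exact absurd ((List.isPrefixOf_iff_prefix.mp hp).isInfix) h
  | case2 x hx hp ih =>
    rw [pvOcc]
    simp only [hx, dite_true, hp, if_false, Bool.false_eq_true]
    refine ih ?_
    intro hinf
    have hsuf : t.drop (x + 1) <:+ t.drop x := by
      have hdd : (t.drop x).drop 1 = t.drop (x + 1) := by
        rw [List.drop_drop]
      rw [← hdd]
      exact List.drop_suffix 1 (t.drop x)
    exact h (hinf.trans hsuf.isInfix)
  | case3 x hx =>
    rw [pvOcc]
    simp [hx]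

lemma pvOcc_first (t e : List Char) (he : e ≠ []) (m : Nat) (hm : e <+: t.drop m) :
    ∀ d i, i ≤ m → m - i = d → (∀ k, i ≤ k → k < m → ¬ e <+: t.drop k) →
      pvOcc t e i = m :: pvOcc t e (m + e.length) := by
  have hel : 1 ≤ e.length := List.length_pos_of_ne_nil he
  have hmlen : m < t.length := by
    by_contra hc
    rw [List.drop_eq_nil_of_le (by omega)] at hm
    exact he (List.prefix_nil.mp hm)
  intro d
  induction d with
  | zero =>
    intro i hi hd _
    have him : i = m := by omega
    subst him
    rw [pvOcc]
    simp only [hmlen, dite_true, List.isPrefixOf_iff_prefix.mpr hm, if_true]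
    have hmax : max e.length 1 = e.length := by omega
    rw [hmax]
  | succ d ih =>
    intro i hi hd hmin
    have hil : i < t.length := by omega
    have hnp : ¬ e.isPrefixOf (t.drop i) = true := by
      rw [List.isPrefixOf_iff_prefix]
      exact hmin i le_rfl (by omega)
    rw [pvOcc]
    simp only [hil, dite_true, hnp, if_false, Bool.false_eq_true]
    exact ih (i + 1) (by omega) (by omega) (fun k hk1 hk2 => hmin k (by omega) hk2)

lemma pvGoA_eq (t e : List Char) (w : Int) (he : e ≠ []) :
    ∀ fuel i, t.length - i < fuel →
      pvGoA t e w fuel i = (pvOcc t e i).map (pvSliceF t e w) := by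
  have hel : 1 ≤ e.length := List.length_pos_of_ne_nil he
  intro fuel
  induction fuel with
  | zero => intro i h; omega
  | succ fuel ih =>
    intro i h
    by_cases hil : i < t.length
    · have hklen : i ≤ t.length := le_of_lt hil
      by_cases hj : PySem.Chars.findFrom t e (i : Int) none = -1
      · have hno : ¬ e <:+: t.drop i :=
          (PySem.Chars.findFrom_natCast_eq_neg_one_iff t e i hklen).mp hj
        rw [pvOcc_nil t e i hno]
        simp only [pvGoA, hil, if_true, hj, List.map_nil]
      · obtain ⟨h1, h2, h3⟩ := PySem.Chars.findFrom_natCast_spec t e i hklen hj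
        obtain ⟨m, hm⟩ := Int.eq_ofNat_of_zero_le
          (le_trans (Int.natCast_nonneg i) h1)
        rw [hm] at hj h1 h2 h3
        simp only [Int.toNat_natCast] at h2 h3
        have him : i ≤ m := by exact_mod_cast h1
        have hocc : pvOcc t e i = m :: pvOcc t e (m + e.length) :=
          pvOcc_first t e he m h2 (m - i) i him rfl h3
        rw [hocc]
        simp only [pvGoA, hil, if_true, List.map_cons]
        rw [hm, if_neg hj]
        simp only [Int.toNat_natCast]
        rw [ih (m + e.length) (by omega)]
        rfl
    · rw [pvOcc]
      simp only [hil, dite_false]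
      simp only [pvGoA, hil, if_false, List.map_nil]

-- ---- B-side: splitOn equals a structural splitter pvSpl, and the fold over it equals the map ----

def pvSpl (e : List Char) (l : List Char) : List (List Char) :=
  if h : e ≠ [] ∧ e.isPrefixOf l then [] :: pvSpl e (l.drop e.length)
  else
    match l with
    | [] => [[]]
    | c :: rest =>
      match pvSpl e rest with
      | [] => [[c]]
      | p :: ps => (c :: p) :: ps
termination_by l.length
decreasing_by
  · have h1 : 1 ≤ e.length := List.length_pos_of_ne_nil h.1
    have h2 : e.length ≤ l.length := (List.isPrefixOf_iff_prefix.mp h.2).length_le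
    simp only [List.length_drop]
    omega
  · simp

lemma pvSpl_ne_nil (e l : List Char) : pvSpl e l ≠ [] := by
  rw [pvSpl]
  split
  · exact List.cons_ne_nil _ _
  · match l with
    | [] => exact List.cons_ne_nil _ _
    | c :: rest =>
      dsimp only
      split <;> exact List.cons_ne_nil _ _

lemma pvModifyHead_id {α : Type} (l : List α) : List.modifyHead (fun x => x) l = l := by
  cases l <;> rfl

lemma pvGo_eq_pvSpl (e : List Char) (he : e ≠ []) :
    ∀ fuel l cur acc, l.length < fuel →
      PySem.Chars.splitOn.go e fuel l cur acc
        = acc.reverse ++ (pvSpl e l).modifyHead (cur.reverse ++ ·) := by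
  intro fuel
  induction fuel with
  | zero => intro l cur acc h; omega
  | succ fuel ih =>
    intro l cur acc h
    match l with
    | [] =>
      rw [PySem.Chars.splitOn.go.eq_def]
      have hp : ¬ (e ≠ [] ∧ e.isPrefixOf ([] : List Char)) := by
        rintro ⟨h1, h2⟩
        exact h1 (List.prefix_nil.mp (List.isPrefixOf_iff_prefix.mp h2))
      rw [pvSpl, dif_neg hp]
      simp
    | c :: rest =>
      rw [PySem.Chars.splitOn.go.eq_def]
      by_cases hpre : e.isPrefixOf (c :: rest)
      · have hlen : e.length ≤ (c :: rest).length :=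
          (List.isPrefixOf_iff_prefix.mp hpre).length_le
        have hel : 1 ≤ e.length := List.length_pos_of_ne_nil he
        simp only [hpre, if_true]
        rw [ih ((c :: rest).drop e.length) [] (cur.reverse :: acc)
            (by simp only [List.length_drop]; simp at h ⊢; omega)]
        conv_rhs => rw [pvSpl]
        rw [dif_pos ⟨he, hpre⟩]
        simp [pvModifyHead_id]
      · simp only [hpre, if_false, Bool.false_eq_true]
        rw [ih rest (c :: cur) acc (by simp at h ⊢; omega)]
        have hp : ¬ (e ≠ [] ∧ e.isPrefixOf (c :: rest)) := by
          rintro ⟨_, h2⟩; exact hpre h2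
        conv_rhs => rw [pvSpl]
        rw [dif_neg hp]
        dsimp only
        obtain ⟨p, ps, hps⟩ : ∃ p ps, pvSpl e rest = p :: ps := by
          match hx : pvSpl e rest with
          | [] => exact absurd hx (pvSpl_ne_nil e rest)
          | p :: ps => exact ⟨p, ps, rfl⟩
        rw [hps]
        simp

lemma splitOn_eq_pvSpl (e t : List Char) (he : e ≠ []) :
    PySem.Chars.splitOn t e = pvSpl e t := by
  unfold PySem.Chars.splitOn
  rw [pvGo_eq_pvSpl e he (t.length + 1) t [] [] (by omega)]
  simp [pvModifyHead_id]

def pvStep (t e : List Char) (w : Int) (st : Nat × List String) (piece : List Char) :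
    Nat × List String :=
  (st.1 + piece.length + e.length, st.2 ++ [pvSliceF t e w (st.1 + piece.length)])

lemma fold_pvSpl (t e : List Char) (w : Int) (he : e ≠ []) :
    ∀ d k acc, t.length - k = d →
      (((pvSpl e (t.drop k)).dropLast).foldl (pvStep t e w) (k, acc)).2
        = acc ++ (pvOcc t e k).map (pvSliceF t e w) := by
  have hel : 1 ≤ e.length := List.length_pos_of_ne_nil he
  intro d
  induction d using Nat.strong_induction_on with
  | _ d ih =>
    intro k acc hd
    by_cases hk : k < t.length
    · have hne : t.drop k ≠ [] := by
        intro hnil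
        have := List.drop_eq_nil_iff.mp hnil
        omega
      obtain ⟨c, rest, hcr⟩ := List.exists_cons_of_ne_nil hne
      by_cases hpre : e.isPrefixOf (t.drop k)
      · -- occurrence at k
        have hlen : e.length ≤ (t.drop k).length :=
          (List.isPrefixOf_iff_prefix.mp hpre).length_le
        rw [pvSpl, dif_pos ⟨he, hpre⟩]
        rw [List.dropLast_cons_of_ne_nil (pvSpl_ne_nil _ _)]
        rw [List.foldl_cons]
        have hdd : (t.drop k).drop e.length = t.drop (k + e.length) := by
          rw [List.drop_drop]
        have hstep : pvStep t e w (k, acc) [] = (k + e.length, acc ++ [pvSliceF t e w k]) := by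
          simp [pvStep]
        rw [hdd, hstep]
        rw [ih (t.length - (k + e.length)) (by simp at hlen; omega) (k + e.length)
            (acc ++ [pvSliceF t e w k]) rfl]
        conv_rhs => rw [pvOcc]
        rw [dif_pos hk, if_pos hpre]
        have hmax : max e.length 1 = e.length := by omega
        rw [hmax, List.map_cons, List.append_assoc]
        rfl
      · -- no occurrence at k: shift by one
        have hp : ¬ (e ≠ [] ∧ e.isPrefixOf (c :: rest)) := by
          rintro ⟨_, h2⟩; rw [hcr] at hpre; exact hpre h2
        rw [hcr]
        rw [pvSpl, dif_neg hp]
        dsimp only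
        have hrest : rest = t.drop (k + 1) := by
          have := congrArg List.tail hcr
          simpa [List.drop_drop, ← List.tail_drop] using this.symm
        obtain ⟨p, ps, hps⟩ : ∃ p ps, pvSpl e rest = p :: ps := by
          match hx : pvSpl e rest with
          | [] => exact absurd hx (pvSpl_ne_nil e rest)
          | p :: ps => exact ⟨p, ps, rfl⟩
        rw [hps]
        have hshift :
            ((((c :: p) :: ps).dropLast).foldl (pvStep t e w) (k, acc)).2
              = (((p :: ps).dropLast).foldl (pvStep t e w) (k + 1, acc)).2 := by
          match ps with
          | [] => rfl
          | q :: qs =>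
            rw [List.dropLast_cons_of_ne_nil (List.cons_ne_nil _ _),
                List.dropLast_cons_of_ne_nil (List.cons_ne_nil _ _),
                List.foldl_cons, List.foldl_cons]
            have hst : pvStep t e w (k, acc) (c :: p) = pvStep t e w (k + 1, acc) p := by
              simp only [pvStep, List.length_cons]
              rw [show k + (p.length + 1) = k + 1 + p.length by omega]
            rw [hst]
        rw [hshift]
        rw [hrest] at hps
        rw [← hps]
        rw [ih (t.length - (k + 1)) (by omega) (k + 1) acc rfl]
        conv_rhs => rw [pvOcc]
        rw [dif_pos hk, if_neg hpre]
    · rw [List.drop_eq_nil_of_le (by omega)]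
      rw [pvOcc, dif_neg hk]
      have hp : ¬ (e ≠ [] ∧ e.isPrefixOf ([] : List Char)) := by
        rintro ⟨h1, h2⟩
        exact h1 (List.prefix_nil.mp (List.isPrefixOf_iff_prefix.mp h2))
      rw [pvSpl, dif_neg hp]
      simp

-- ===== VERDICT (by name: the statement is the Claim_ definition above) =====
theorem contextOfEntity_spec : Claim_equal_contextOfEntity := by
  intro t e w _hd hpre
  unfold Spec_contextOfEntity contextOfEntity contextOfEntity_alt
  have he : e.toList ≠ [] := fun h => hpre (String.toList_eq_nil_iff.mp h)
  have hA : pvGoA t.toList e.toList w (t.toList.length + 1) 0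
      = (pvOcc t.toList e.toList 0).map (pvSliceF t.toList e.toList w) :=
    pvGoA_eq t.toList e.toList w he _ 0 (by omega)
  rw [hA]
  have hsplit : PySem.Str.split? t e
      = some ((pvSpl e.toList t.toList).map String.ofList) := by
    unfold PySem.Str.split? PySem.Chars.split?
    have hie : e.toList.isEmpty = false := by
      cases hxe : e.toList with
      | nil => exact absurd hxe he
      | cons a l => rfl
    rw [hie]
    simp [splitOn_eq_pvSpl e.toList t.toList he]
  rw [hsplit]
  dsimp only
  rw [← List.map_dropLast, List.foldl_map]
  have hfold : ∀ (L : List (List Char)) (st : Nat × List String),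
      L.foldl (fun (st : Nat × List String) (p : List Char) =>
        ((st.1 + (String.ofList p).toList.length) + e.toList.length,
         st.2 ++ [String.ofList (PySem.Chars.slice t.toList
            (some (((st.1 + (String.ofList p).toList.length : Nat) : Int) - w))
            (some (((st.1 + (String.ofList p).toList.length : Nat) : Int) + w + (e.toList.length : Int))))])) st
      = L.foldl (pvStep t.toList e.toList w) st := by
    intro L
    induction L with
    | nil => intro st; rfl
    | cons p L ihL =>
      intro st
      rw [List.foldl_cons, List.foldl_cons, ihL]
      simp [pvStep, pvSliceF]
  rw [hfold]
  have hf := fold_pvSpl t.toList e.toList w he (t.toList.length - 0) 0 [] rfl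
  rw [List.drop_zero] at hf
  rw [hf]
  simp
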